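-- pv_equiv track=rewrite | github.com/daniilpetraytis/SOA | mafia_game/serializable/models.py | query_filter
-- ===== SOURCE A (Python) =====
-- def _cut_level(requested, key):
--     result = list()
--     for req in requested:
--         if req.startswith("%s__" % key):
--             result.append(req.split('__', 1)[1])
--         if req.startswith("-%s__" % key):
--             result.append("-" + req.split('__', 1)[1])
--     return result
--
-- def query_filter(available, requested):
--     available = set(available)
--     include = set()
--     exclude = set()
--     for req in requested:
--         if "__" not in req:
--             if req.startswith('-'):
--                 exclude.add(req[1:])
--             else:
--                 include.add(req)
--         else:
--             if not req.startswith('-'):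
--                 include.add(req.split('__', 1)[0])
--     if len(include) == 0:
--         filtered = available
--     else:
--         filtered = available.intersection(include)
--     filtered = {req: _cut_level(requested, req) for req in filtered.difference(exclude)}
--     return filtered
-- ===== SOURCE B (Python) =====
-- def query_filter(available, requested):
--     groups = {}
--     include = set()
--     exclude = set()
--     for req in requested:
--         if "__" in req:
--             head, tail = req.split("__", 1)
--             groups.setdefault(head, []).append(tail)
--             if head.startswith("-"):
--                 groups.setdefault(head[1:], []).append("-" + tail)
--             else:
--                 include.add(head)
--         elif req.startswith("-"):
--             exclude.add(req[1:])
--         else: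
--             include.add(req)
--     return {key: groups.get(key, [])
--             for key in dict.fromkeys(available)
--             if (not include or key in include) and key not in exclude}
-- ===== Notes on version B (the rewrite author's own statement) =====
-- stated objective: faster
-- what changed: B replaces A's per-filtered-key rescan of requested (_cut_level) by one grouping pass that splits each requested item once at its first '__' into a dict keyed by the head, then looks each surviving key up once; Pre_ excludes inputs where an available key containing '__' or ending '_' is prefix-matched by a requested item, a corner of the key__sublevel syntax where A splits at a different '__' boundary than the first and either reading is defensible.
-- outside the precondition, e.g. on query_filter(['a_'], ['a_', 'a___x']): A returns {'a_': ['_x']}, B returns {'a_': []}; on query_filter(['a__b'], ['-a__b__c']): A returns {'a__b': ['-b__c']}, B returns {'a__b': []}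
import Mathlib
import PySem

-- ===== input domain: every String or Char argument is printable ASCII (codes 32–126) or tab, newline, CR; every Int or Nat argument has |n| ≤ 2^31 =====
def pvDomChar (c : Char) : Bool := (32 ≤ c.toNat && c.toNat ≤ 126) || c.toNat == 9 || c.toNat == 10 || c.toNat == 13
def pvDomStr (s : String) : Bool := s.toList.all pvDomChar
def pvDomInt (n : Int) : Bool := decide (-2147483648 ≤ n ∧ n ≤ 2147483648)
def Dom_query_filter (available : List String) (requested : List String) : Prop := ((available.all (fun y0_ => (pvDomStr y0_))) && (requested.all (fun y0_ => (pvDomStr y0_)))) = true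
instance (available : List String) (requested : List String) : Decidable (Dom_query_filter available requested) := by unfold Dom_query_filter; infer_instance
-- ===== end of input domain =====

-- B groups each requested item once, at its first "__", into a dict keyed by the head, replacing
-- A's per-filtered-key rescan of `requested` (_cut_level); objective: faster. Pre_ excludes
-- available keys containing "__" or ending with "_" (see the sentence above Pre_).


-- req.split('__', 1)[0] / [1]  (both Pythons compute these; the list-getD defaults are never
-- reached where the split is used, since there "__" is known to occur in req)

def pvHead (req : String) : String := ((PySem.Str.splitMax? req "__" 1).getD []).getD 0 ""

def pvTail (req : String) : String := ((PySem.Str.splitMax? req "__" 1).getD []).getD 1 ""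


-- ===== PORT A =====
-- _cut_level: rescan all of requested for each key

def cut_level (requested : List String) (key : String) : List String :=
  requested.foldl (fun result req =>
    let result := if PySem.Str.startswith req (key ++ "__") then result ++ [pvTail req] else result
    if PySem.Str.startswith req ("-" ++ (key ++ "__")) then result ++ ["-" ++ pvTail req] else result) []


-- the include/exclude loop of A

def stepA (st : PySem.Set String × PySem.Set String) (req : String) :
    PySem.Set String × PySem.Set String :=
  if ¬ (PySem.Str.isIn "__" req) then
    if PySem.Str.startswith req "-" then (st.1, st.2.add (PySem.Str.slice req (some 1) none))
    else (st.1.add req, st.2)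
  else
    if ¬ PySem.Str.startswith req "-" then (st.1.add (pvHead req), st.2) else st


-- A returns a dict comprehension iterating a Python set; keys and values are exact, the
-- iteration order here is the set's insertion order (dict outputs are compared ignoring order)

def query_filter (available : List String) (requested : List String) : List (String × List String) :=
  let availableS := PySem.Set.ofList available
  let st := requested.foldl stepA (PySem.Set.empty, PySem.Set.empty)
  let filtered := if st.1.length = 0 then availableS else PySem.Set.inter availableS st.1
  (PySem.Set.diff filtered st.2).map (fun req => (req, cut_level requested req))


-- ===== PORT B =====
-- the single pass of B: state = (groups, include, exclude); each requested item is split once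
-- at its first "__" and recorded under its head (and, for a "-head", under head[1:] too)

def stepB (st : PySem.Dict String (List String) × PySem.Set String × PySem.Set String)
    (req : String) : PySem.Dict String (List String) × PySem.Set String × PySem.Set String :=
  if PySem.Str.isIn "__" req then
    let h := pvHead req
    let t := pvTail req
    let g := st.1.modify h [] (· ++ [t])
    if PySem.Str.startswith h "-" then
      (g.modify (PySem.Str.slice h (some 1) none) [] (· ++ ["-" ++ t]), st.2.1, st.2.2)
    else (g, st.2.1.add h, st.2.2)
  else if PySem.Str.startswith req "-" then
    (st.1, st.2.1, st.2.2.add (PySem.Str.slice req (some 1) none))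
  else (st.1, st.2.1.add req, st.2.2)


-- the dict comprehension of B over dict.fromkeys(available) (= ordered dedup)

def query_filter_alt (available : List String) (requested : List String) :
    List (String × List String) :=
  let st := requested.foldl stepB (PySem.Dict.empty, PySem.Set.empty, PySem.Set.empty)
  ((PySem.List.dedup available).filter
      (fun key => (st.2.1.isEmpty || st.2.1.contains key) && !st.2.2.contains key)).map
    (fun key => (key, st.1.getD key []))


-- ===== PRECONDITION & SPEC =====
-- Pre_ excludes inputs where an available key that contains "__" or ends with "_" is
-- prefix-matched by some requested item: there A attaches sub-selectors split at a different
-- "__" boundary than the first one, a corner of the key__sublevel syntax where either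
-- reading is defensible.
def Pre_query_filter (available : List String) (requested : List String) : Prop :=
  ∀ k ∈ available,
    (PySem.Str.isIn "__" k = false ∧ PySem.Str.endswith k "_" = false) ∨
    (∀ req ∈ requested, PySem.Str.startswith req (k ++ "__") = false ∧
      PySem.Str.startswith req ("-" ++ (k ++ "__")) = false)
instance (available : List String) (requested : List String) : Decidable (Pre_query_filter available requested) := by unfold Pre_query_filter; infer_instance

def pvWitness_query_filter : List String × List String := (["name", "age"], ["name", "-age", "name__first"])

def Spec_query_filter (available : List String) (requested : List String) (out : List (String × List String)) : Prop := out = query_filter_alt available requested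
instance (available : List String) (requested : List String) (out : List (String × List String)) : Decidable (Spec_query_filter available requested out) := by unfold Spec_query_filter; infer_instance

-- ===== CLAIM (what is proved, stated in full; the proofs are below) =====
def Claim_equal_query_filter : Prop := ∀ (available : List String) (requested : List String), Dom_query_filter available requested → Pre_query_filter available requested → Spec_query_filter available requested (query_filter available requested)

-- ===== LEMMAS AND PROOFS =====
-- splitting a char list at the first "__" occurrence

def ddSplit : List Char → Option (List Char × List Char)
  | c1 :: c2 :: rest =>
      if c1 = '_' ∧ c2 = '_' then some ([], rest)
      else (ddSplit (c2 :: rest)).map (fun p => (c1 :: p.1, p.2))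
  | _ => none

theorem ddSplit_cons_cons (c1 c2 : Char) (rest : List Char) :
    ddSplit (c1 :: c2 :: rest) =
      if c1 = '_' ∧ c2 = '_' then some ([], rest)
      else (ddSplit (c2 :: rest)).map (fun p => (c1 :: p.1, p.2)) := by
  rw [ddSplit]

theorem ddSplit_eq_append : ∀ (l h t : List Char), ddSplit l = some (h, t) → l = h ++ '_' :: '_' :: t := by
  intro l
  induction l with
  | nil => intro h t hd; simp [ddSplit] at hd
  | cons c1 rest ih =>
    intro h t hd
    cases rest with
    | nil => simp [ddSplit] at hd
    | cons c2 rest' =>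
      rw [ddSplit_cons_cons] at hd
      split_ifs at hd with hc
      · obtain ⟨rfl, rfl⟩ := hc
        simp only [Option.some.injEq, Prod.mk.injEq] at hd
        obtain ⟨rfl, rfl⟩ := hd
        simp
      · simp only [Option.map_eq_some_iff] at hd
        obtain ⟨p, hp, heq⟩ := hd
        have h1 : c1 :: p.1 = h := congrArg Prod.fst heq
        have h2 : p.2 = t := congrArg Prod.snd heq
        subst h1; subst h2
        have := ih p.1 p.2 (by rw [hp])
        rw [List.cons_append, ← this]

theorem ddSplit_append : ∀ (k t : List Char), ¬ ['_','_'] <:+: k → ¬ ['_'] <:+ k →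
    ddSplit (k ++ '_' :: '_' :: t) = some (k, t) := by
  intro k
  induction k with
  | nil => intro t _ _; rw [List.nil_append, ddSplit]; simp
  | cons c k' ih =>
    intro t h1 h2
    cases k' with
    | nil =>
      have hc : ¬ c = '_' := fun hcc => h2 (by rw [hcc])
      rw [List.cons_append, List.nil_append, ddSplit_cons_cons,
        if_neg (by tauto),
        show ddSplit ('_' :: '_' :: t) = some ([], t) from by rw [ddSplit_cons_cons]; simp]
      simp
    | cons c2 k'' =>
      have hne : ¬ (c = '_' ∧ c2 = '_') := by
        rintro ⟨rfl, rfl⟩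
        exact h1 (List.infix_iff_prefix_suffix.mpr ⟨'_' :: '_' :: k'', by simp, List.suffix_rfl⟩)
      have h1' : ¬ ['_','_'] <:+: (c2 :: k'') := fun hi =>
        h1 (List.infix_cons_iff.mpr (Or.inr hi))
      have h2' : ¬ ['_'] <:+ (c2 :: k'') := fun hs =>
        h2 (List.suffix_cons_iff.mpr (Or.inr hs))
      simp only [List.cons_append]
      rw [ddSplit_cons_cons, if_neg hne]
      have := ih t h1' h2'
      simp only [List.cons_append] at this
      rw [this]
      simp

theorem ddSplit_isSome_iff : ∀ (l : List Char), (ddSplit l).isSome = true ↔ ['_','_'] <:+: l := by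
  intro l
  induction l with
  | nil => simp [ddSplit]
  | cons c1 rest ih =>
    cases rest with
    | nil =>
      rw [show ddSplit [c1] = none from rfl]
      simp only [Option.isSome_none]
      constructor
      · intro h; exact absurd h (by decide)
      · intro hi
        exfalso
        have := hi.length_le
        simp at this
    | cons c2 rest' =>
      rw [ddSplit_cons_cons]
      rw [List.infix_cons_iff]
      constructor
      · intro hs
        split_ifs at hs with hc
        · obtain ⟨rfl, rfl⟩ := hc
          exact Or.inl (by simp)
        · right
          exact ih.mp (by simpa using hs)
      · intro hor
        split_ifs with hc
        · simp
        · rcases hor with hp | hi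
          · exfalso
            rw [List.cons_prefix_cons] at hp
            obtain ⟨rfl, hp⟩ := hp
            rw [List.cons_prefix_cons] at hp
            exact hc ⟨rfl, hp.1.symm⟩
          · simpa using ih.mpr hi

-- splitOnMax at maxsplit 1 splits at the first "__"

theorem goZero (sep : List Char) (fuel : Nat) (l cur : List Char) (acc : List (List Char)) :
    PySem.Chars.splitOnMax.go sep fuel 0 l cur acc = ((cur.reverse ++ l) :: acc).reverse := by
  cases fuel with
  | zero => rfl
  | succ f => cases l with
    | nil =>
      show (cur.reverse :: acc).reverse = _
      simp
    | cons c rest => rfl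

theorem goOne : ∀ (fuel : Nat) (l : List Char), l.length < fuel → ∀ (cur : List Char) (acc : List (List Char)),
    PySem.Chars.splitOnMax.go ['_','_'] fuel 1 l cur acc =
      (match ddSplit l with
       | some (h, t) => t :: (cur.reverse ++ h) :: acc
       | none => (cur.reverse ++ l) :: acc).reverse := by
  intro fuel
  induction fuel with
  | zero => intro l h; omega
  | succ f ih =>
    intro l hl cur acc
    cases l with
    | nil =>
      show (cur.reverse :: acc).reverse = _
      simp [ddSplit]
    | cons c rest =>
      by_cases hp : List.isPrefixOf ['_','_'] (c :: rest) = true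
      · conv_lhs => rw [PySem.Chars.splitOnMax.go]
        simp only [hp, if_true]
        obtain ⟨c2, rest', rfl⟩ : ∃ c2 rest', rest = c2 :: rest' := by
          cases rest with
          | nil => simp [List.isPrefixOf] at hp
          | cons a b => exact ⟨a, b, rfl⟩
        have hc : c = '_' ∧ c2 = '_' := by
          have := by simpa [List.isPrefixOf] using hp
          exact ⟨this.1.symm, this.2.symm⟩
        obtain ⟨rfl, rfl⟩ := hc
        rw [if_neg (by omega), goZero]
        simp [ddSplit]
      · conv_lhs => rw [PySem.Chars.splitOnMax.go]
        rw [if_neg (by omega), if_neg hp]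
        rw [ih rest (by simp at hl ⊢; omega) (c :: cur) acc]
        cases rest with
        | nil =>
          simp [ddSplit]
        | cons c2 rest' =>
          have hne : ¬ (c = '_' ∧ c2 = '_') := by
            rintro ⟨rfl, rfl⟩; simp [List.isPrefixOf] at hp
          rw [ddSplit_cons_cons, if_neg hne]
          cases hd : ddSplit (c2 :: rest') with
          | none => simp
          | some p => simp

theorem splitOnMax_dd (l : List Char) :
    PySem.Chars.splitOnMax l ['_','_'] 1 =
      match ddSplit l with
      | some (h, t) => [h, t]
      | none => [l] := by
  unfold PySem.Chars.splitOnMax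
  rw [if_neg (by omega), show Int.toNat 1 = 1 from rfl, goOne (l.length + 1) l (by omega) [] []]
  cases hd : ddSplit l with
  | none => simp
  | some p => simp

-- the decomposition of a request containing "__" into pvHead/pvTail

theorem pv_decomp (req : String) (hin : PySem.Str.isIn "__" req = true) :
    ∃ h t, ddSplit req.toList = some (h, t) ∧
      pvHead req = String.ofList h ∧ pvTail req = String.ofList t ∧
      req.toList = h ++ '_' :: '_' :: t := by
  have hinf : ['_','_'] <:+: req.toList := by
    have := (PySem.Str.isIn_iff_infix "__" req).mp hin
    simpa using this
  obtain ⟨p, hp⟩ := Option.isSome_iff_exists.mp ((ddSplit_isSome_iff req.toList).mpr hinf)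
  have hsplit : PySem.Str.splitMax? req "__" 1 = some [String.ofList p.1, String.ofList p.2] := by
    unfold PySem.Str.splitMax?
    rw [show ("__" : String).toList = ['_','_'] from rfl,
      show PySem.Chars.splitMax? req.toList ['_','_'] 1 =
        some (PySem.Chars.splitOnMax req.toList ['_','_'] 1) from by
      unfold PySem.Chars.splitMax?; rw [if_neg (by simp)]]
    rw [splitOnMax_dd, hp]
    rfl
  refine ⟨p.1, p.2, by rw [hp], ?_, ?_, ddSplit_eq_append _ _ _ (by rw [hp])⟩
  · unfold pvHead
    rw [hsplit]
    rfl
  · unfold pvTail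
    rw [hsplit]
    rfl

-- startswith facts

theorem sw_dash_iff (h : String) :
    PySem.Str.startswith h "-" = true ↔ ∃ tl, h.toList = '-' :: tl := by
  rw [PySem.Str.startswith_eq, PySem.Chars.startswith_iff]
  constructor
  · rintro ⟨tl, htl⟩
    exact ⟨tl, by simpa using htl.symm⟩
  · rintro ⟨tl, htl⟩
    exact ⟨tl, by simp [htl]⟩

theorem slice1_toList (s : String) : (PySem.Str.slice s (some 1) none).toList = s.toList.tail := by
  simp only [PySem.Str.toList_slice, PySem.Chars.slice_eq_listSlice, PySem.List.slice_from_one]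

theorem negKey_iff (h k : String) :
    (PySem.Str.startswith h "-" = true ∧ PySem.Str.slice h (some 1) none = k) ↔
      h = String.ofList ('-' :: k.toList) := by
  constructor
  · rintro ⟨hs, hk⟩
    obtain ⟨tl, htl⟩ := (sw_dash_iff h).mp hs
    have h1 : (PySem.Str.slice h (some 1) none).toList = k.toList := by rw [hk]
    rw [slice1_toList, htl] at h1
    simp only [List.tail_cons] at h1
    apply String.toList_inj.mp
    rw [htl]
    simp [h1]
  · rintro rfl
    have htl : (String.ofList ('-' :: k.toList)).toList = '-' :: k.toList := String.toList_ofList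
    refine ⟨(sw_dash_iff _).mpr ⟨k.toList, htl⟩, ?_⟩
    apply String.toList_inj.mp
    rw [slice1_toList, htl]
    simp

theorem sw_pos_iff (req k : String) :
    PySem.Str.startswith req (k ++ "__") = true ↔ (k.toList ++ ['_', '_']) <+: req.toList := by
  rw [PySem.Str.startswith_eq, PySem.Chars.startswith_iff, String.toList_append]
  simp

theorem sw_neg_iff (req k : String) :
    PySem.Str.startswith req ("-" ++ (k ++ "__")) = true ↔
      (('-' :: k.toList) ++ ['_', '_']) <+: req.toList := by
  rw [PySem.Str.startswith_eq, PySem.Chars.startswith_iff, String.toList_append,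
    String.toList_append]
  simp

theorem isIn_of_infix_dd (req : String) (pre : List Char)
    (h : (pre ++ ['_', '_']) <+: req.toList) : PySem.Str.isIn "__" req = true := by
  rw [PySem.Str.isIn_iff_infix]
  obtain ⟨t, ht⟩ := h
  exact ⟨pre, t, by simpa using ht⟩

-- the condition on keys Pre_ states, in list form
def keyOK (k : String) : Prop := ¬ ['_','_'] <:+: k.toList ∧ ¬ ['_'] <:+ k.toList

theorem keyOK_neg (k : String) (hk : keyOK k) : keyOK (String.ofList ('-' :: k.toList)) := by
  obtain ⟨h1, h2⟩ := hk
  constructor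
  · rw [String.toList_ofList]
    intro hi
    rcases List.infix_cons_iff.mp hi with hp | hi'
    · rw [List.cons_prefix_cons] at hp
      exact absurd hp.1 (by decide)
    · exact h1 hi'
  · rw [String.toList_ofList]
    intro hs
    rcases List.suffix_cons_iff.mp hs with he | hs'
    · cases k.toList <;> simp at he
    · exact h2 hs'

-- if the first-split head of a "__"-request is k, the request prefix-matches k

theorem pos_of_head (req k : String) (hin : PySem.Str.isIn "__" req = true)
    (hh : pvHead req = k) : PySem.Str.startswith req (k ++ "__") = true := by
  obtain ⟨h, t, hd, hh', -, hdec⟩ := pv_decomp req hin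
  have : h = k.toList := by
    rw [hh] at hh'
    have := congrArg String.toList hh'.symm
    simpa using this
  subst this
  exact (sw_pos_iff req k).mpr ⟨t, by simpa using hdec.symm⟩

theorem neg_of_head (req k : String) (hin : PySem.Str.isIn "__" req = true)
    (hh : pvHead req = String.ofList ('-' :: k.toList)) :
    PySem.Str.startswith req ("-" ++ (k ++ "__")) = true := by
  have := pos_of_head req (String.ofList ('-' :: k.toList)) hin hh
  rw [sw_pos_iff, String.toList_ofList] at this
  exact (sw_neg_iff req k).mpr this

-- under keyOK k, matching k's prefix is exactly "first-split head is k"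

theorem pos_match_iff (req k : String) (hk : keyOK k) :
    PySem.Str.startswith req (k ++ "__") = true ↔
      PySem.Str.isIn "__" req = true ∧ pvHead req = k := by
  constructor
  · intro hs
    obtain ⟨t, ht⟩ := (sw_pos_iff req k).mp hs
    have hin := isIn_of_infix_dd req k.toList ((sw_pos_iff req k).mp hs)
    refine ⟨hin, ?_⟩
    obtain ⟨h, t', hd, hh, -, hdec⟩ := pv_decomp req hin
    have hd2 : ddSplit req.toList = some (k.toList, t) := by
      rw [show req.toList = k.toList ++ '_' :: '_' :: t from by simpa using ht.symm]
      exact ddSplit_append k.toList t hk.1 hk.2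
    rw [hd] at hd2
    simp only [Option.some.injEq, Prod.mk.injEq] at hd2
    rw [hh, hd2.1]
    exact String.ofList_toList
  · rintro ⟨hin, hh⟩
    exact pos_of_head req k hin hh

theorem neg_match_iff (req k : String) (hk : keyOK k) :
    PySem.Str.startswith req ("-" ++ (k ++ "__")) = true ↔
      PySem.Str.isIn "__" req = true ∧ pvHead req = String.ofList ('-' :: k.toList) := by
  have hk' := keyOK_neg k hk
  have base := pos_match_iff req (String.ofList ('-' :: k.toList)) hk'
  rw [← base, sw_neg_iff, sw_pos_iff, String.toList_ofList]

-- the head of a "__"-request starts with '-' exactly when the request does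

theorem head_dash (req : String) (hin : PySem.Str.isIn "__" req = true) :
    PySem.Str.startswith (pvHead req) "-" = PySem.Str.startswith req "-" := by
  obtain ⟨h, t, -, hh, -, hdec⟩ := pv_decomp req hin
  cases hcl : h with
  | nil =>
    subst hcl
    have hreq : req.toList = '_' :: '_' :: t := by simpa using hdec
    have h1 : PySem.Str.startswith (pvHead req) "-" = false := by
      rw [Bool.eq_false_iff]
      intro hs
      obtain ⟨tl, htl⟩ := (sw_dash_iff _).mp hs
      rw [hh] at htl
      simp at htl
    have h2 : PySem.Str.startswith req "-" = false := by
      rw [Bool.eq_false_iff]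
      intro hs
      obtain ⟨tl, htl⟩ := (sw_dash_iff _).mp hs
      rw [hreq] at htl
      simp at htl
    rw [h1, h2]
  | cons c h' =>
    subst hcl
    by_cases hc : c = '-'
    · subst hc
      have h1 : PySem.Str.startswith (pvHead req) "-" = true :=
        (sw_dash_iff _).mpr ⟨h', by rw [hh]; simp⟩
      have h2 : PySem.Str.startswith req "-" = true :=
        (sw_dash_iff _).mpr ⟨h' ++ '_' :: '_' :: t, by rw [hdec]; simp⟩
      rw [h1, h2]
    · have h1 : PySem.Str.startswith (pvHead req) "-" = false := by
        rw [Bool.eq_false_iff]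
        intro hs
        obtain ⟨tl, htl⟩ := (sw_dash_iff _).mp hs
        rw [hh] at htl
        simp at htl
        exact hc htl.1
      have h2 : PySem.Str.startswith req "-" = false := by
        rw [Bool.eq_false_iff]
        intro hs
        obtain ⟨tl, htl⟩ := (sw_dash_iff _).mp hs
        rw [hdec] at htl
        simp at htl
        exact hc htl.1
      rw [h1, h2]

-- per-request contribution to one key, as A's scan sees it

def contribA (key req : String) : List String :=
  (if PySem.Str.startswith req (key ++ "__") then [pvTail req] else []) ++
  (if PySem.Str.startswith req ("-" ++ (key ++ "__")) then ["-" ++ pvTail req] else [])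

-- the groups component of stepB, taken alone

def stepBg (g : PySem.Dict String (List String)) (req : String) :
    PySem.Dict String (List String) :=
  if PySem.Str.isIn "__" req then
    let g' := g.modify (pvHead req) [] (· ++ [pvTail req])
    if PySem.Str.startswith (pvHead req) "-" then
      g'.modify (PySem.Str.slice (pvHead req) (some 1) none) [] (· ++ ["-" ++ pvTail req])
    else g'
  else g

theorem stepBg_getD (g : PySem.Dict String (List String)) (req k : String) (hk : keyOK k) :
    (stepBg g req).getD k [] = g.getD k [] ++ contribA k req := by
  unfold stepBg contribA
  by_cases hin : PySem.Str.isIn "__" req = true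
  · rw [if_pos hin]
    simp only []
    by_cases hs : PySem.Str.startswith (pvHead req) "-" = true
    · rw [if_pos hs, PySem.Dict.getD_modify]
      by_cases hk2 : k = PySem.Str.slice (pvHead req) (some 1) none
      · have hneg : pvHead req = String.ofList ('-' :: k.toList) := (negKey_iff _ k).mp ⟨hs, hk2.symm⟩
        have hmatchneg : PySem.Str.startswith req ("-" ++ (k ++ "__")) = true :=
          (neg_match_iff req k hk).mpr ⟨hin, hneg⟩
        have hhk : ¬ (pvHead req = k) := by
          intro he
          have := congrArg (fun s => s.toList.length) (he.symm.trans hneg)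
          simp at this
        have hmatchpos : ¬ PySem.Str.startswith req (k ++ "__") = true := by
          intro hp
          exact hhk ((pos_match_iff req k hk).mp hp).2
        have hkh : ¬ (k = pvHead req) := fun he => hhk he.symm
        rw [if_pos hk2, PySem.Dict.getD_modify, ← hk2, if_neg hkh,
          if_neg hmatchpos, if_pos hmatchneg]
        simp
      · have hneg : ¬ (pvHead req = String.ofList ('-' :: k.toList)) := by
          intro he
          exact hk2 (((negKey_iff _ k).mpr he).2).symm
        have hmatchneg : ¬ PySem.Str.startswith req ("-" ++ (k ++ "__")) = true := by
          intro hp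
          exact hneg ((neg_match_iff req k hk).mp hp).2
        rw [if_neg hk2, PySem.Dict.getD_modify, if_neg hmatchneg]
        by_cases hk1 : k = pvHead req
        · have hmatchpos : PySem.Str.startswith req (k ++ "__") = true :=
            (pos_match_iff req k hk).mpr ⟨hin, hk1.symm⟩
          rw [if_pos hk1, if_pos hmatchpos, ← hk1]
          simp
        · have hmatchpos : ¬ PySem.Str.startswith req (k ++ "__") = true := by
            intro hp
            exact hk1 ((pos_match_iff req k hk).mp hp).2.symm
          rw [if_neg hk1, if_neg hmatchpos]
          simp
    · rw [if_neg hs, PySem.Dict.getD_modify]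
      have hneg : ¬ (pvHead req = String.ofList ('-' :: k.toList)) := by
        intro he
        exact hs ((negKey_iff _ k).mpr he).1
      have hmatchneg : ¬ PySem.Str.startswith req ("-" ++ (k ++ "__")) = true := by
        intro hp
        exact hneg ((neg_match_iff req k hk).mp hp).2
      rw [if_neg hmatchneg]
      by_cases hk1 : k = pvHead req
      · have hmatchpos : PySem.Str.startswith req (k ++ "__") = true :=
          (pos_match_iff req k hk).mpr ⟨hin, hk1.symm⟩
        rw [if_pos hk1, if_pos hmatchpos, ← hk1]
        simp
      · have hmatchpos : ¬ PySem.Str.startswith req (k ++ "__") = true := by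
          intro hp
          exact hk1 ((pos_match_iff req k hk).mp hp).2.symm
        rw [if_neg hk1, if_neg hmatchpos]
        simp
  · rw [if_neg hin]
    have h1 : ¬ PySem.Str.startswith req (k ++ "__") = true := fun hs =>
      hin (isIn_of_infix_dd req _ ((sw_pos_iff req k).mp hs))
    have h2 : ¬ PySem.Str.startswith req ("-" ++ (k ++ "__")) = true := fun hs =>
      hin (isIn_of_infix_dd req _ ((sw_neg_iff req k).mp hs))
    rw [if_neg h1, if_neg h2]
    simp

theorem cut_level_eq (requested : List String) (k : String) :
    cut_level requested k = requested.flatMap (contribA k) := by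
  unfold cut_level
  suffices h : ∀ (l : List String) (acc : List String),
      (l.foldl (fun result req =>
        let result := if PySem.Str.startswith req (k ++ "__") then result ++ [pvTail req] else result
        if PySem.Str.startswith req ("-" ++ (k ++ "__")) then result ++ ["-" ++ pvTail req]
        else result) acc) = acc ++ l.flatMap (contribA k) by
    rw [h requested []]
    simp
  intro l
  induction l with
  | nil => intro acc; simp
  | cons r rest ih =>
    intro acc
    rw [List.foldl_cons, ih, List.flatMap_cons]
    have hstep : (let result := if PySem.Str.startswith r (k ++ "__") then acc ++ [pvTail r] else acc
        if PySem.Str.startswith r ("-" ++ (k ++ "__")) then result ++ ["-" ++ pvTail r]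
        else result) = acc ++ contribA k r := by
      unfold contribA
      dsimp only
      split_ifs <;> simp
    rw [hstep]
    simp

theorem groupsFold_getD (requested : List String) (k : String) (hk : keyOK k) :
    (requested.foldl stepBg PySem.Dict.empty).getD k [] = cut_level requested k := by
  rw [cut_level_eq]
  suffices h : ∀ (l : List String) (g : PySem.Dict String (List String)),
      (l.foldl stepBg g).getD k [] = g.getD k [] ++ l.flatMap (contribA k) by
    rw [h requested PySem.Dict.empty, PySem.Dict.getD_empty]
    simp
  intro l
  induction l with
  | nil => simp
  | cons r rest ih =>
    intro g
    rw [List.foldl_cons, ih, stepBg_getD g r k hk, List.flatMap_cons]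
    simp

theorem stepBg_getD_null (g : PySem.Dict String (List String)) (req k : String)
    (hpos : PySem.Str.startswith req (k ++ "__") = false)
    (hneg : PySem.Str.startswith req ("-" ++ (k ++ "__")) = false) :
    (stepBg g req).getD k [] = g.getD k [] := by
  unfold stepBg
  by_cases hin : PySem.Str.isIn "__" req = true
  · rw [if_pos hin]
    simp only []
    have hk1 : ¬ (k = pvHead req) := by
      intro he
      rw [pos_of_head req k hin he.symm] at hpos
      exact absurd hpos (by simp)
    by_cases hs : PySem.Str.startswith (pvHead req) "-" = true
    · have hk2 : ¬ (k = PySem.Str.slice (pvHead req) (some 1) none) := by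
        intro he
        have hof : pvHead req = String.ofList ('-' :: k.toList) :=
          (negKey_iff _ k).mp ⟨hs, he.symm⟩
        rw [neg_of_head req k hin hof] at hneg
        exact absurd hneg (by simp)
      rw [if_pos hs, PySem.Dict.getD_modify, if_neg hk2, PySem.Dict.getD_modify, if_neg hk1]
    · rw [if_neg hs, PySem.Dict.getD_modify, if_neg hk1]
  · rw [if_neg hin]

theorem groupsFold_getD_null (requested : List String) (k : String)
    (hreq : ∀ req ∈ requested, PySem.Str.startswith req (k ++ "__") = false ∧
      PySem.Str.startswith req ("-" ++ (k ++ "__")) = false) :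
    (requested.foldl stepBg PySem.Dict.empty).getD k [] = [] := by
  suffices h : ∀ (l : List String), (∀ req ∈ l, PySem.Str.startswith req (k ++ "__") = false ∧
      PySem.Str.startswith req ("-" ++ (k ++ "__")) = false) →
      ∀ (g : PySem.Dict String (List String)), (l.foldl stepBg g).getD k [] = g.getD k [] by
    rw [h requested hreq PySem.Dict.empty, PySem.Dict.getD_empty]
  intro l
  induction l with
  | nil => intro _ g; rfl
  | cons r rest ih =>
    intro hl g
    rw [List.foldl_cons, ih (fun req hm => hl req (List.mem_cons_of_mem r hm)),
      stepBg_getD_null g r k (hl r (List.mem_cons_self)).1 (hl r (List.mem_cons_self)).2]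

theorem cut_level_null (requested : List String) (k : String)
    (hreq : ∀ req ∈ requested, PySem.Str.startswith req (k ++ "__") = false ∧
      PySem.Str.startswith req ("-" ++ (k ++ "__")) = false) :
    cut_level requested k = [] := by
  rw [cut_level_eq]
  apply List.flatMap_eq_nil_iff.mpr
  intro req hm
  unfold contribA
  rw [(hreq req hm).1, (hreq req hm).2]
  simp

theorem stepB_eq (g : PySem.Dict String (List String)) (ie : PySem.Set String × PySem.Set String)
    (req : String) : stepB (g, ie) req = (stepBg g req, stepA ie req) := by
  unfold stepB stepBg stepA
  by_cases hin : PySem.Str.isIn "__" req = true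
  · simp only [hin, head_dash req hin]
    by_cases hs : PySem.Str.startswith req "-" = true
    all_goals simp only [PySem.Str.startswith_eq,
      show ("-" : String).toList = ['-'] from rfl] at hs
    · simp [hs]
    · simp [Bool.eq_false_iff.mpr hs]
  · simp only [Bool.eq_false_iff.mpr hin]
    by_cases hs : PySem.Str.startswith req "-" = true
    all_goals simp only [PySem.Str.startswith_eq,
      show ("-" : String).toList = ['-'] from rfl] at hs
    · simp [hs]
    · simp [Bool.eq_false_iff.mpr hs]

theorem foldB_split (requested : List String) :
    ∀ (g : PySem.Dict String (List String)) (ie : PySem.Set String × PySem.Set String),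
    requested.foldl stepB (g, ie) = (requested.foldl stepBg g, requested.foldl stepA ie) := by
  induction requested with
  | nil => intro g ie; rfl
  | cons r rest ih =>
    intro g ie
    rw [List.foldl_cons, stepB_eq, ih, List.foldl_cons, List.foldl_cons]

theorem dedup_eq_ofList (xs : List String) : PySem.List.dedup xs = PySem.Set.ofList xs := by
  rfl

-- ===== VERDICT (by name: the statement is the Claim_ definition above) =====

theorem query_filter_spec : Claim_equal_query_filter := by
  intro available requested _ hpre
  unfold Spec_query_filter query_filter query_filter_alt
  rw [foldB_split]
  simp only []
  rw [dedup_eq_ofList]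
  set st := requested.foldl stepA (PySem.Set.empty, PySem.Set.empty) with hst
  set G := requested.foldl stepBg PySem.Dict.empty with hG
  set S := PySem.Set.ofList available with hSdef
  have hOK : ∀ x ∈ S, keyOK x ∨ (∀ req ∈ requested, PySem.Str.startswith req (x ++ "__") = false ∧
      PySem.Str.startswith req ("-" ++ (x ++ "__")) = false) := by
    intro x hx
    have hxa : x ∈ available := by
      rw [hSdef, PySem.Set.mem_ofList] at hx
      exact hx
    rcases hpre x hxa with ⟨h1, h2⟩ | hnone
    · left
      constructor
      · intro hi
        have : PySem.Str.isIn "__" x = true := (PySem.Str.isIn_iff_infix "__" x).mpr (by simpa using hi)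
        rw [h1] at this
        exact absurd this (by simp)
      · intro hs
        have : PySem.Str.endswith x "_" = true := by
          rw [PySem.Str.endswith_eq, PySem.Chars.endswith_iff]
          simpa using hs
        rw [h2] at this
        exact absurd this (by simp)
    · right
      exact hnone
  have hval : ∀ (l : List String), (∀ x ∈ l, x ∈ S) →
      l.map (fun req => (req, cut_level requested req)) = l.map (fun key => (key, G.getD key [])) := by
    intro l hl
    apply List.map_congr_left
    intro x hx
    rcases hOK x (hl x hx) with hk | hnone
    · rw [hG, groupsFold_getD requested x hk]
    · rw [hG, groupsFold_getD_null requested x hnone, cut_level_null requested x hnone]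
  by_cases hlen : st.1.length = 0
  · have hnil : st.1 = [] := List.length_eq_zero_iff.mp hlen
    rw [if_pos hlen]
    unfold PySem.Set.diff
    have hfilt : S.filter (fun x => !st.2.contains x) =
        S.filter (fun key => (st.1.isEmpty || st.1.contains key) && !st.2.contains key) :=
      List.filter_congr (fun x _ => by rw [hnil]; simp [PySem.Set.contains])
    rw [hfilt]
    exact hval _ (fun x hx => List.mem_of_mem_filter hx)
  · have hne : st.1 ≠ [] := fun h => hlen (by rw [h]; rfl)
    have hemp : st.1.isEmpty = false := by
      rw [List.isEmpty_eq_false_iff]; exact hne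
    rw [if_neg hlen]
    unfold PySem.Set.diff PySem.Set.inter
    rw [List.filter_filter]
    have hfilt : S.filter (fun a => !st.2.contains a && st.1.contains a) =
        S.filter (fun key => (st.1.isEmpty || st.1.contains key) && !st.2.contains key) :=
      List.filter_congr (fun x _ => by rw [hemp]; simp [Bool.and_comm])
    rw [hfilt]
    exact hval _ (fun x hx => List.mem_of_mem_filter hx)
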